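-- pv_equiv track=rewrite | github.com/teagh82/coding_study | coding_study_python/hash_위장.py | solution
-- ===== SOURCE A (Python) =====
-- import collections
--
-- def solution(clothes):
--     answer = 1
--     kind = []
--
--     for i in clothes:
--         kind.append(i[1])
--
--     cnt = collections.Counter(kind).most_common()
--
--     for i in cnt:
--         answer *= (i[1]+1)
--
--     return answer -1
-- ===== SOURCE B (Python) =====
-- def solution(clothes):
--     cats = sorted(item[1] for item in clothes)
--     ans = 1
--     run = 0
--     prev = None
--     for c in cats:
--         if prev is not None and c == prev:
--             run += 1
--         else:
--             ans *= run + 1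
--             run = 1
--             prev = c
--     return ans * (run + 1) - 1
-- ===== Notes on version B (the rewrite author's own statement) =====
-- stated objective: alternative
-- what changed: Replaces the hash Counter + most_common pass with sorting the category list and multiplying (run_length+1) over consecutive equal runs in one scan.
import Mathlib
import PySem

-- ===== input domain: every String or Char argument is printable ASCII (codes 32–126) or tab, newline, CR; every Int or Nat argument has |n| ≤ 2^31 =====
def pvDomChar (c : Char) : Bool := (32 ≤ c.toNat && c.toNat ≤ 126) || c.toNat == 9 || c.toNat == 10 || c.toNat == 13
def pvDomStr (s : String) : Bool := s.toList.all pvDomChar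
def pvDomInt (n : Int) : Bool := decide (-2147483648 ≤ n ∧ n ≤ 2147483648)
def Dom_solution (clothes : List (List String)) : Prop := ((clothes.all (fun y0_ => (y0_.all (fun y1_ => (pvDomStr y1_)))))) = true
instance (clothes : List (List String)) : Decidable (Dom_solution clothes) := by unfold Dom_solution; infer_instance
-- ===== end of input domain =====

-- B replaces A's hash Counter + most_common pass by sorting the category list and
-- multiplying (run_length + 1) over consecutive equal runs in one scan (alternative algorithm).

-- ===== PORT A =====
-- i[1]; in range on every input admitted by Pre_solution, so the .getD "" default is never used there.
def solution (clothes : List (List String)) : Int :=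
  let kind := clothes.foldl (fun k i => k ++ [(PySem.List.pyGet? i 1).getD ""]) []
  -- Counter(kind).most_common() = items sorted by count, descending, stable (CPython's
  -- sorted(items, key=itemgetter(1), reverse=True)); ported exactly by PySem.List.sorted with reverse.
  let cnt := PySem.List.sorted (PySem.Dict.counter kind).items (fun p => p.2) true
  (cnt.foldl (fun a p => a * (p.2 + 1)) 1) - 1

-- ===== PORT B =====
-- the loop body of Source B: state (ans, run, prev); 'prev is not None and c == prev' is prev = some c
def stepB (s : Int × Int × Option String) (c : String) : Int × Int × Option String :=
  if s.2.2 = some c then (s.1, s.2.1 + 1, s.2.2)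
  else (s.1 * (s.2.1 + 1), (1 : Int), some c)

def solution_alt (clothes : List (List String)) : Int :=
  let cats := PySem.List.sorted (clothes.map (fun item => (PySem.List.pyGet? item 1).getD "")) (fun x => x) false
  let r := cats.foldl stepB ((1 : Int), (0 : Int), (none : Option String))
  r.1 * (r.2.1 + 1) - 1

-- ===== PRECONDITION & SPEC =====
-- Pre_ excludes exactly the inputs where A raises IndexError (an item with fewer than 2 entries).
def Pre_solution (clothes : List (List String)) : Prop := ∀ i ∈ clothes, 2 ≤ i.length
instance (clothes : List (List String)) : Decidable (Pre_solution clothes) := by unfold Pre_solution; infer_instance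
def pvWitness_solution : List (List String) := [["yellow_hat", "headgear"], ["blue_sunglasses", "eyewear"], ["green_turban", "headgear"]]
def Spec_solution (clothes : List (List String)) (out : Int) : Prop := out = solution_alt clothes
instance (clothes : List (List String)) (out : Int) : Decidable (Spec_solution clothes out) := by unfold Spec_solution; infer_instance

-- ===== CLAIM (what is proved, stated in full; the proofs are below) =====
def Claim_equal_solution : Prop := ∀ (clothes : List (List String)), Dom_solution clothes → Pre_solution clothes → Spec_solution clothes (solution clothes)

-- ===== LEMMAS AND PROOFS =====

-- the common category extractor of both ports
def catOf (i : List String) : String := (PySem.List.pyGet? i 1).getD ""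

-- the common value: product over distinct categories of (count + 1)
def V (l : List String) : Int := ∏ k ∈ l.toFinset, ((l.count k : Int) + 1)

theorem foldl_app_map (clothes : List (List String)) (acc : List String) :
    clothes.foldl (fun k i => k ++ [catOf i]) acc = acc ++ clothes.map catOf := by
  induction clothes generalizing acc with
  | nil => simp
  | cons c t ih => simp [List.foldl, ih]

theorem foldl_mul (l : List (String × Int)) (a : Int) :
    l.foldl (fun a p => a * (p.2 + 1)) a = a * (l.map (fun p => p.2 + 1)).prod := by
  induction l generalizing a with
  | nil => simp
  | cons c t ih => simp [List.foldl, ih, mul_assoc]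

-- A's loop over Counter(kind).most_common() computes V kind
theorem A_eq (kind : List String) :
    (PySem.List.sorted (PySem.Dict.counter kind).items (fun p => p.2) true).foldl
      (fun a p => a * (p.2 + 1)) 1 = V kind := by
  rw [foldl_mul, one_mul]
  have hperm := PySem.List.sorted_perm (PySem.Dict.counter kind).items (fun p : String × Int => p.2) true
  rw [(hperm.map (fun p : String × Int => p.2 + 1)).prod_eq]
  rw [PySem.Dict.items_counter]
  rw [List.map_map]
  have hnd := PySem.Set.nodup_ofList (xs := kind)
  have htf : (PySem.Set.ofList kind).toFinset = kind.toFinset := by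
    ext x; simp [PySem.Set.mem_ofList]
  rw [V, ← htf, List.prod_toFinset _ hnd]
  rfl

-- invariant of B's run-scan fold on a sorted tail: prev = p, all of l is ≥ p
theorem runfold (l : List String) (hs : l.Pairwise (· ≤ ·)) (p : String)
    (hp : ∀ x ∈ l, p ≤ x) (ans run : Int) :
    (l.foldl stepB (ans, run, some p)).1 * ((l.foldl stepB (ans, run, some p)).2.1 + 1)
      = ans * (run + (l.count p : Int) + 1) * ∏ k ∈ l.toFinset.erase p, ((l.count k : Int) + 1) := by
  induction l generalizing p ans run with
  | nil => simp
  | cons c t ih =>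
    rcases List.pairwise_cons.mp hs with ⟨hc, ht⟩
    by_cases hpc : p = c
    · subst hpc
      have : stepB (ans, run, some p) p = (ans, run + 1, some p) := by simp [stepB]
      rw [List.foldl_cons, this, ih ht p (fun x hx => hc x hx) ans (run + 1)]
      have htf : (p :: t).toFinset.erase p = t.toFinset.erase p := by
        simp [List.toFinset_cons, Finset.erase_insert_eq_erase]
      rw [htf]
      have hcnt : ((p :: t).count p : Int) = (t.count p : Int) + 1 := by
        simp
      rw [hcnt]
      have hprod : ∏ k ∈ t.toFinset.erase p, (((p :: t).count k : Int) + 1)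
          = ∏ k ∈ t.toFinset.erase p, ((t.count k : Int) + 1) := by
        apply Finset.prod_congr rfl
        intro k hk
        exact congrArg (· + 1) (congrArg _ (List.count_cons_of_ne (fun h => (Finset.ne_of_mem_erase hk) h.symm)))
      rw [hprod]; ring
    · have hplt : p < c := lt_of_le_of_ne (hp c (List.mem_cons_self)) hpc
      have hnp : p ∉ c :: t := by
        intro hm
        rcases List.mem_cons.mp hm with h | h
        · exact hpc h
        · exact absurd (hc p h) (not_le.mpr hplt)
      have : stepB (ans, run, some p) c = (ans * (run + 1), 1, some c) := by
        simp [stepB, hpc]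
      rw [List.foldl_cons, this, ih ht c hc (ans * (run + 1)) 1]
      have hcp0 : ((c :: t).count p : Int) = 0 := by
        simp [List.count_eq_zero_of_not_mem hnp]
      have htf : (c :: t).toFinset.erase p = (c :: t).toFinset := by
        apply Finset.erase_eq_of_notMem
        simpa using hnp
      rw [hcp0, htf]
      have hmem : c ∈ (c :: t).toFinset := by simp
      rw [← Finset.mul_prod_erase _ _ hmem]
      have htf2 : ((c :: t).toFinset).erase c = t.toFinset.erase c := by
        simp [List.toFinset_cons, Finset.erase_insert_eq_erase]
      rw [htf2]
      have hprod : ∏ k ∈ t.toFinset.erase c, (((c :: t).count k : Int) + 1)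
          = ∏ k ∈ t.toFinset.erase c, ((t.count k : Int) + 1) := by
        apply Finset.prod_congr rfl
        intro k hk
        exact congrArg (· + 1) (congrArg _ (List.count_cons_of_ne (fun h => (Finset.ne_of_mem_erase hk) h.symm)))
      rw [hprod]
      have hcc : ((c :: t).count c : Int) = (t.count c : Int) + 1 := by simp
      rw [hcc]; ring

-- B's full fold on a sorted list computes V
theorem B_eq (cats : List String) (hs : cats.Pairwise (· ≤ ·)) :
    (cats.foldl stepB (1, 0, none)).1 * ((cats.foldl stepB (1, 0, none)).2.1 + 1) = V cats := by
  cases cats with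
  | nil => simp [V]
  | cons c t =>
    rcases List.pairwise_cons.mp hs with ⟨hc, ht⟩
    have : stepB (1, 0, none) c = (1, 1, some c) := by simp [stepB]
    rw [List.foldl_cons, this, runfold t ht c hc 1 1]
    have hmem : c ∈ (c :: t).toFinset := by simp
    rw [V, ← Finset.mul_prod_erase _ _ hmem]
    have htf2 : ((c :: t).toFinset).erase c = t.toFinset.erase c := by
      simp [List.toFinset_cons, Finset.erase_insert_eq_erase]
    rw [htf2]
    have hprod : ∏ k ∈ t.toFinset.erase c, (((c :: t).count k : Int) + 1)
        = ∏ k ∈ t.toFinset.erase c, ((t.count k : Int) + 1) := by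
      apply Finset.prod_congr rfl
      intro k hk
      exact congrArg (· + 1) (congrArg _ (List.count_cons_of_ne (fun h => (Finset.ne_of_mem_erase hk) h.symm)))
    rw [hprod]
    have hcc : ((c :: t).count c : Int) = (t.count c : Int) + 1 := by simp
    rw [hcc]; ring

theorem V_perm {l l' : List String} (h : l.Perm l') : V l = V l' := by
  unfold V
  have htf : l.toFinset = l'.toFinset := by ext x; simp [h.mem_iff]
  rw [htf]
  exact Finset.prod_congr rfl (fun k _ => by rw [h.count_eq])

-- ===== VERDICT (by name: the statement is the Claim_ definition above) =====
theorem solution_spec : Claim_equal_solution := by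
  intro clothes _ _
  show solution clothes = solution_alt clothes
  unfold solution solution_alt
  rw [show (fun (k : List String) (i : List String) => k ++ [(PySem.List.pyGet? i 1).getD ""])
        = (fun k i => k ++ [catOf i]) from rfl,
      show (fun (item : List String) => (PySem.List.pyGet? item 1).getD "") = catOf from rfl,
      foldl_app_map, List.nil_append]
  show List.foldl (fun a p => a * (p.2 + 1)) 1
        (PySem.List.sorted (PySem.Dict.counter (clothes.map catOf)).items (fun p => p.2) true) - 1
      = (let r := List.foldl stepB (1, 0, none) (PySem.List.sorted (clothes.map catOf) (fun x => x) false);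
         r.1 * (r.2.1 + 1) - 1)
  rw [A_eq]
  have hs := PySem.List.sorted_pairwise (clothes.map catOf) (fun x : String => x)
  show V (clothes.map catOf) - 1
      = ((PySem.List.sorted (clothes.map catOf) (fun x => x) false).foldl stepB (1, 0, none)).1
        * (((PySem.List.sorted (clothes.map catOf) (fun x => x) false).foldl stepB (1, 0, none)).2.1 + 1) - 1
  rw [B_eq _ hs, V_perm (PySem.List.sorted_perm (clothes.map catOf) (fun x : String => x) false)]
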